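-- pv_equiv track=rewrite | github.com/goodholic/AutoCI | modules/ai_model_integration.py | _parse_code_response
-- ===== SOURCE A (Python) =====
-- def _parse_code_response(response: str) -> tuple[str, str]:
--     """AI 응답에서 코드와 설명 분리"""
--     # 코드 블록 찾기
--     code_blocks = []
--     explanation_parts = []
--
--     lines = response.split('\n')
--     in_code_block = False
--     current_code = []
--
--     for line in lines:
--         if line.strip().startswith('```'):
--             if in_code_block:
--                 # 코드 블록 종료
--                 code_blocks.append('\n'.join(current_code))
--                 current_code = []
--             in_code_block = not in_code_block
--         elif in_code_block:
--             current_code.append(line)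
--         else:
--             explanation_parts.append(line)
--
--     # 마지막 코드 블록 처리
--     if current_code:
--         code_blocks.append('\n'.join(current_code))
--
--     code = '\n\n'.join(code_blocks) if code_blocks else response
--     explanation = '\n'.join(explanation_parts).strip()
--
--     return code, explanation
-- ===== SOURCE B (Python) =====
-- def _parse_code_response(response: str) -> tuple[str, str]:
--     """Split response into fence-delimited segments, then assign by parity."""
--     segments = [[]]
--     for line in response.split('\n'):
--         if line.strip().startswith('```'):
--             segments.append([])
--         else:
--             segments[-1].append(line)
--     code_blocks = ['\n'.join(seg) for i, seg in enumerate(segments) if i % 2 == 1]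
--     if len(segments) % 2 == 0 and not segments[-1]:
--         # trailing unclosed empty block is never emitted
--         code_blocks.pop()
--     explanation_lines = [l for i, seg in enumerate(segments) if i % 2 == 0 for l in seg]
--     code = '\n\n'.join(code_blocks) if code_blocks else response
--     return code, '\n'.join(explanation_lines).strip()
-- ===== Notes on version B (the rewrite author's own statement) =====
-- stated objective: alternative
-- what changed: B first groups the lines into fence-delimited segments (no in_code_block flag, no running code/explanation accumulators), then assigns segments to code or explanation by index parity, dropping only a trailing unclosed empty block.
import Mathlib
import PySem

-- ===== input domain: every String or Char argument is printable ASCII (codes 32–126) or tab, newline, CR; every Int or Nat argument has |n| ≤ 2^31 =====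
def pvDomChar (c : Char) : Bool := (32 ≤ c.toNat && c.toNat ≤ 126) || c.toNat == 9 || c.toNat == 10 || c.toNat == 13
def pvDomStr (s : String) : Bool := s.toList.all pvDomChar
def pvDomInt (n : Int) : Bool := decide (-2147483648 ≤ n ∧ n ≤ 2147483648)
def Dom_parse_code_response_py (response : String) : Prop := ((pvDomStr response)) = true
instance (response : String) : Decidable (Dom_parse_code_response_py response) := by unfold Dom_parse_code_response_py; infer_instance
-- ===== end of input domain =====

-- B groups the lines into fence-delimited segments and assigns them to code/explanation
-- by index parity; A walks the lines with an in_code_block flag and running accumulators.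

-- ===== PORT A =====
def pvAStep (st : List String × List String × Bool × List String) (line : String) :
    List String × List String × Bool × List String :=
  let (code_blocks, explanation_parts, in_code_block, current_code) := st
  if PySem.Str.startswith (PySem.Str.strip line) "```" then
    let (code_blocks, current_code) :=
      if in_code_block then (code_blocks ++ [PySem.Str.join "\n" current_code], ([] : List String))
      else (code_blocks, current_code)
    (code_blocks, explanation_parts, !in_code_block, current_code)
  else if in_code_block then
    (code_blocks, explanation_parts, in_code_block, current_code ++ [line])
  else
    (code_blocks, explanation_parts ++ [line], in_code_block, current_code)

def parse_code_response_py (response : String) : String × String :=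
  let lines := (PySem.Str.split? response "\n").getD []
  let st := lines.foldl pvAStep ([], [], false, [])
  let (code_blocks, explanation_parts, _, current_code) := st
  let code_blocks :=
    if current_code.isEmpty then code_blocks
    else code_blocks ++ [PySem.Str.join "\n" current_code]
  let code := if code_blocks.isEmpty then response else PySem.Str.join "\n\n" code_blocks
  (code, PySem.Str.strip (PySem.Str.join "\n" explanation_parts))

-- ===== PORT B =====
def pvFence (line : String) : Bool := PySem.Str.startswith (PySem.Str.strip line) "```"

-- segments delimited by fence lines (a fence starts a new segment)
def pvSegs : List String → List (List String)
  | [] => [[]]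
  | l :: ls =>
    if pvFence l then [] :: pvSegs ls
    else
      match pvSegs ls with
      | [] => [[l]]
      | s :: rest => (l :: s) :: rest

-- ['\n'.join(seg) for i, seg in enumerate(segments) if i % 2 == 1]
def pvOddJoins (i : Nat) : List (List String) → List String
  | [] => []
  | s :: r => if i % 2 == 1 then PySem.Str.join "\n" s :: pvOddJoins (i + 1) r
              else pvOddJoins (i + 1) r

-- [l for i, seg in enumerate(segments) if i % 2 == 0 for l in seg]
def pvEvenFlat (i : Nat) : List (List String) → List String
  | [] => []
  | s :: r => if i % 2 == 0 then s ++ pvEvenFlat (i + 1) r else pvEvenFlat (i + 1) r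

def parse_code_response_py_alt (response : String) : String × String :=
  let segments := pvSegs ((PySem.Str.split? response "\n").getD [])
  let code_blocks := pvOddJoins 0 segments
  let code_blocks :=
    if segments.length % 2 == 0 && (segments.getLast? == some []) then code_blocks.dropLast
    else code_blocks
  let explanation_lines := pvEvenFlat 0 segments
  let code := if code_blocks.isEmpty then response else PySem.Str.join "\n\n" code_blocks
  (code, PySem.Str.strip (PySem.Str.join "\n" explanation_lines))

-- ===== PRECONDITION & SPEC =====
def Spec_parse_code_response_py (response : String) (out : String × String) : Prop := out = parse_code_response_py_alt response
instance (response : String) (out : String × String) : Decidable (Spec_parse_code_response_py response out) := by unfold Spec_parse_code_response_py; infer_instance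

-- ===== CLAIM (what is proved, stated in full; the proofs are below) =====
def Claim_equal_parse_code_response_py : Prop := ∀ (response : String), Dom_parse_code_response_py response → Spec_parse_code_response_py response (parse_code_response_py response)

-- ===== LEMMAS AND PROOFS =====

-- finishing function on segment lists: what A's loop computes from the remaining segments
def pvComb : Bool → List (List String) → List String × List String × Bool × List String
  | inb, [] => ([], [], inb, [])
  | inb, [s] => if inb then ([], [], true, s) else ([], s, false, [])
  | inb, s :: s' :: rest =>
    let (b, e, ib, c) := pvComb (!inb) (s' :: rest)
    if inb then (PySem.Str.join "\n" s :: b, e, ib, c) else (b, s ++ e, ib, c)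

def pvConsHead (cur : List String) : List (List String) → List (List String)
  | [] => [cur]
  | s :: r => (cur ++ s) :: r

theorem pvSegs_ne_nil (ls : List String) : pvSegs ls ≠ [] := by
  cases ls with
  | nil => simp [pvSegs]
  | cons l ls =>
    simp only [pvSegs]
    split
    · simp
    · cases h : pvSegs ls <;> simp

theorem pvConsHead_nil (S : List (List String)) (h : S ≠ []) : pvConsHead [] S = S := by
  cases S with
  | nil => exact absurd rfl h
  | cons s r => simp [pvConsHead]

theorem pvComb_false_consLine (l : String) (s : List String) (r : List (List String)) :
    pvComb false ((l :: s) :: r) =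
      ((pvComb false (s :: r)).1, l :: (pvComb false (s :: r)).2.1,
       (pvComb false (s :: r)).2.2.1, (pvComb false (s :: r)).2.2.2) := by
  cases r <;> simp [pvComb]

theorem pvFoldA (ls : List String) : ∀ (blocks expl : List String) (inb : Bool) (cur : List String),
    (inb = false → cur = []) →
    List.foldl pvAStep (blocks, expl, inb, cur) ls =
      (blocks ++ (pvComb inb (pvConsHead cur (pvSegs ls))).1,
       expl ++ (pvComb inb (pvConsHead cur (pvSegs ls))).2.1,
       (pvComb inb (pvConsHead cur (pvSegs ls))).2.2.1,
       (pvComb inb (pvConsHead cur (pvSegs ls))).2.2.2) := by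
  induction ls with
  | nil =>
    intro blocks expl inb cur hcur
    cases inb with
    | false => simp [hcur rfl, pvSegs, pvConsHead, pvComb]
    | true => simp [pvSegs, pvConsHead, pvComb]
  | cons l ls ih =>
    intro blocks expl inb cur hcur
    simp only [List.foldl_cons, pvAStep]
    by_cases hf : PySem.Str.startswith (PySem.Str.strip l) "```"
    · -- fence line: toggle, close the current block if inside one
      have hS : pvSegs (l :: ls) = [] :: pvSegs ls := by simp only [pvSegs, pvFence, hf, if_true]
      cases inb with
      | true =>
        rw [hS]
        have := ih (blocks ++ [PySem.Str.join "\n" cur]) expl false [] (fun _ => rfl)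
        simp only [hf, if_true, Bool.not_true, Bool.not_false] at *
        try simp only [ite_true, ite_false, Bool.false_eq_true, if_true, if_false]
        rw [this, pvConsHead_nil _ (pvSegs_ne_nil ls)]
        have hcomb : pvComb true (pvConsHead cur ([] :: pvSegs ls)) =
            (PySem.Str.join "\n" cur :: (pvComb false (pvSegs ls)).1,
             (pvComb false (pvSegs ls)).2.1, (pvComb false (pvSegs ls)).2.2.1,
             (pvComb false (pvSegs ls)).2.2.2) := by
          simp only [pvConsHead, List.append_nil]
          obtain ⟨s, r, h⟩ : ∃ s r, pvSegs ls = s :: r := by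
            cases h : pvSegs ls with
            | nil => exact absurd h (pvSegs_ne_nil ls)
            | cons s r => exact ⟨s, r, rfl⟩
          rw [h]; simp [pvComb]
        rw [hcomb]; simp
      | false =>
        rw [hS, hcur rfl]
        have := ih blocks expl true [] (by simp)
        simp only [hf, if_true, Bool.not_true, Bool.not_false] at *
        try simp only [ite_true, ite_false, Bool.false_eq_true, if_true, if_false]
        rw [this, pvConsHead_nil _ (pvSegs_ne_nil ls)]
        have hcomb : pvComb false (pvConsHead [] ([] :: pvSegs ls)) =
            ((pvComb true (pvSegs ls)).1, (pvComb true (pvSegs ls)).2.1,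
             (pvComb true (pvSegs ls)).2.2.1, (pvComb true (pvSegs ls)).2.2.2) := by
          simp only [pvConsHead, List.append_nil]
          obtain ⟨s, r, h⟩ : ∃ s r, pvSegs ls = s :: r := by
            cases h : pvSegs ls with
            | nil => exact absurd h (pvSegs_ne_nil ls)
            | cons s r => exact ⟨s, r, rfl⟩
          rw [h]; simp [pvComb]
        rw [hcomb]
    · -- ordinary line
      obtain ⟨s, r, h⟩ : ∃ s r, pvSegs ls = s :: r := by
        cases h : pvSegs ls with
        | nil => exact absurd h (pvSegs_ne_nil ls)
        | cons s r => exact ⟨s, r, rfl⟩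
      have hS : pvSegs (l :: ls) = (l :: s) :: r := by simp only [pvSegs, pvFence, hf, Bool.false_eq_true, if_false, h]
      cases inb with
      | true =>
        have := ih blocks expl true (cur ++ [l]) (by simp)
        simp only [hf, Bool.false_eq_true, if_false] at *
        try simp only [ite_true, ite_false, Bool.false_eq_true, if_true, if_false]
        rw [this, hS, h]
        simp [pvConsHead]
      | false =>
        rw [hcur rfl] at *
        have := ih blocks (expl ++ [l]) false [] (fun _ => rfl)
        simp only [hf, Bool.false_eq_true, if_false] at *
        try simp only [ite_true, ite_false, Bool.false_eq_true, if_true, if_false]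
        rw [this, hS, h]
        simp only [pvConsHead, List.nil_append, pvComb_false_consLine]
        simp

theorem pvComb_spec (S : List (List String)) : ∀ (inb : Bool) (i : Nat), S ≠ [] →
    inb = decide (i % 2 = 1) →
    (pvComb inb S).2.1 = pvEvenFlat i S ∧
    (pvComb inb S).2.2.1 = decide ((i + S.length - 1) % 2 = 1) ∧
    (pvComb inb S).2.2.2 = (if (i + S.length - 1) % 2 = 1 then S.getLast?.getD [] else []) ∧
    (pvComb inb S).1 ++
        (if (i + S.length - 1) % 2 = 1 then [PySem.Str.join "\n" (S.getLast?.getD [])] else []) =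
      pvOddJoins i S := by
  induction S with
  | nil => intro inb i h; exact absurd rfl h
  | cons s r ih =>
    intro inb i _ hinb
    cases r with
    | nil =>
      cases inb with
      | false =>
        have hi : i % 2 = 0 := by
          by_cases h : i % 2 = 1
          · simp [h] at hinb
          · omega
        simp [pvComb, pvOddJoins, pvEvenFlat, hi]
      | true =>
        have hi : i % 2 = 1 := by
          by_cases h : i % 2 = 1
          · exact h
          · simp [h] at hinb
        simp [pvComb, pvOddJoins, pvEvenFlat, hi]
    | cons s' rest =>
      have hpar : (!inb) = decide ((i + 1) % 2 = 1) := by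
        by_cases h : i % 2 = 1
        · rw [hinb]; simp [h]; omega
        · rw [hinb]; simp [h]; omega
      obtain ⟨he, hib, hc, hb⟩ := ih (!inb) (i + 1) (by simp) hpar
      rcases hP : pvComb (!inb) (s' :: rest) with ⟨b, e, ib, c⟩
      rw [hP] at he hib hc hb
      dsimp only at he hib hc hb
      have hidx : i + 1 + (s' :: rest).length - 1 = i + (s :: s' :: rest).length - 1 := by
        simp [List.length_cons]; omega
      rw [hidx] at hib hc hb
      cases inb with
      | true =>
        have hi : i % 2 = 1 := by
          by_cases h : i % 2 = 1
          · exact h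
          · simp [h] at hinb
        have heven : pvEvenFlat i (s :: s' :: rest) = pvEvenFlat (i + 1) (s' :: rest) := by
          simp [pvEvenFlat, hi]
        have hodd : pvOddJoins i (s :: s' :: rest) =
            PySem.Str.join "\n" s :: pvOddJoins (i + 1) (s' :: rest) := by
          simp [pvOddJoins, hi]
        refine ⟨?_, ?_, ?_, ?_⟩
        · simp only [pvComb, hP]; rw [if_pos trivial]; rw [heven]; exact he
        · simp only [pvComb, hP]; rw [if_pos trivial]; exact hib
        · simp only [pvComb, hP]; rw [if_pos trivial]; rw [List.getLast?_cons_cons]; exact hc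
        · simp only [pvComb, hP]; rw [if_pos trivial]
          rw [hodd, List.cons_append, List.getLast?_cons_cons, hb]
      | false =>
        have hi : i % 2 = 0 := by
          by_cases h : i % 2 = 1
          · simp [h] at hinb
          · omega
        have heven : pvEvenFlat i (s :: s' :: rest) = s ++ pvEvenFlat (i + 1) (s' :: rest) := by
          simp [pvEvenFlat, hi]
        have hodd : pvOddJoins i (s :: s' :: rest) = pvOddJoins (i + 1) (s' :: rest) := by
          simp [pvOddJoins, hi]
        refine ⟨?_, ?_, ?_, ?_⟩
        · simp only [pvComb, hP]; rw [if_neg (by simp)]; rw [heven, he]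
        · simp only [pvComb, hP]; rw [if_neg (by simp)]; exact hib
        · simp only [pvComb, hP]; rw [if_neg (by simp)]; rw [List.getLast?_cons_cons]; exact hc
        · simp only [pvComb, hP]; rw [if_neg (by simp)]
          rw [hodd, List.getLast?_cons_cons, hb]

-- ===== VERDICT (by name: the statement is the Claim_ definition above) =====
theorem parse_code_response_py_spec : Claim_equal_parse_code_response_py := by
  intro response _
  unfold Spec_parse_code_response_py parse_code_response_py parse_code_response_py_alt
  have hfold := pvFoldA ((PySem.Str.split? response "\n").getD []) [] [] false [] (fun _ => rfl)
  rw [pvConsHead_nil _ (pvSegs_ne_nil _)] at hfold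
  set S := pvSegs ((PySem.Str.split? response "\n").getD []) with hS
  have hne : S ≠ [] := pvSegs_ne_nil _
  obtain ⟨he, hib, hc, hb⟩ := pvComb_spec S false 0 hne (by simp)
  rcases hP : pvComb false S with ⟨b, e, ib, c⟩
  rw [hP] at he hib hc hb hfold
  dsimp only at he hib hc hb
  obtain ⟨last, hlast⟩ : ∃ l, S.getLast? = some l := by
    cases h : S.getLast? with
    | none => exact absurd (List.getLast?_eq_none_iff.mp h) hne
    | some l => exact ⟨l, rfl⟩
  rw [hlast] at hc hb
  simp only [Option.getD_some] at hc hb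
  obtain ⟨n, hn⟩ : ∃ n, S.length = n + 1 := by
    cases h : S.length with
    | zero => exact absurd (List.length_eq_zero_iff.mp h) hne
    | succ n => exact ⟨n, rfl⟩
  rw [hn] at hc hb
  simp only [Nat.add_sub_cancel, Nat.zero_add] at hc hb
  simp only [hfold, List.nil_append]
  try dsimp only
  by_cases hpar : n % 2 = 1
  · -- last segment is an unclosed code block
    rw [if_pos hpar] at hc hb
    by_cases hemp : last = []
    · -- trailing unclosed empty block: A skips it, B pops it
      have hA : c.isEmpty = true := by rw [hc, hemp]; rfl
      have hB : (S.length % 2 == 0 && (S.getLast? == some [])) = true := by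
        rw [hlast, hemp]
        have : S.length % 2 == 0 := by simp [hn]; omega
        simp [this]
      rw [hA, hB]
      try simp only [Bool.false_eq_true, if_false, eq_self_iff_true, if_true]
      rw [← hb, he]
      have hdrop : (b ++ [PySem.Str.join "\n" last]).dropLast = b := by simp
      rw [hdrop]
    · have hA : c.isEmpty = false := by
        rw [hc]; cases last with
        | nil => exact absurd rfl hemp
        | cons a l => rfl
      have hB : (S.length % 2 == 0 && (S.getLast? == some [])) = false := by
        rw [hlast]
        simp [hemp]
      rw [hA, hB]
      try simp only [Bool.false_eq_true, if_false, eq_self_iff_true, if_true]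
      rw [← hb, hc, he]
  · -- last segment is explanation: no pending code block
    rw [if_neg hpar] at hc hb
    rw [List.append_nil] at hb
    have hA : c.isEmpty = true := by rw [hc]; rfl
    have hB : (S.length % 2 == 0 && (S.getLast? == some [])) = false := by
      have : (S.length % 2 == 0) = false := by simp [hn]; omega
      rw [this, Bool.false_and]
    rw [hA, hB]
    try simp only [Bool.false_eq_true, if_false, eq_self_iff_true, if_true]
    rw [← hb, he]
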